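-- pv_equiv track=rewrite | github.com/tseziy/AliceDiary | skill/scenes.py | _split_homework
-- ===== SOURCE A (Python) =====
-- def _split_homework(homework: list):
--     n = 3
--     if len(homework) <= n:
--         list_hw = [homework]
--     else:
--         list_hw = [homework[i : i + n] for i in range(0, len(homework), n)]
--         if len(list_hw) > 1 and len(list_hw[-1]) == 1:
--             # последний урок из ПРЕДПОСЛЕДНЕЙ групп становится ПЕРВЫМ в последней группе
--             list_hw[-1].insert(0, list_hw[-2].pop(2))
--     return list_hw
-- ===== SOURCE B (Python) =====
-- def _split_homework(homework: list):
--     if len(homework) <= 3: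
--         return [homework]
--     q, r = divmod(len(homework), 3)
--     if r == 0:
--         sizes = [3] * q
--     elif r == 2:
--         sizes = [3] * q + [2]
--     else:
--         sizes = [3] * (q - 1) + [2, 2]
--     out = []
--     off = 0
--     for size in sizes:
--         out.append(homework[off:off + size])
--         off += size
--     return out
-- ===== Notes on version B (the rewrite author's own statement) =====
-- stated objective: simpler
-- what changed: B computes the chunk-size layout ([3]*q, [3]*q+[2], or [3]*(q-1)+[2,2]) from divmod(len,3) up front and slices the list once per size, instead of A's chunk-every-3-then-patch rebalance that pops the last element of the second-to-last chunk and re-inserts it into the last chunk.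
import Mathlib
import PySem

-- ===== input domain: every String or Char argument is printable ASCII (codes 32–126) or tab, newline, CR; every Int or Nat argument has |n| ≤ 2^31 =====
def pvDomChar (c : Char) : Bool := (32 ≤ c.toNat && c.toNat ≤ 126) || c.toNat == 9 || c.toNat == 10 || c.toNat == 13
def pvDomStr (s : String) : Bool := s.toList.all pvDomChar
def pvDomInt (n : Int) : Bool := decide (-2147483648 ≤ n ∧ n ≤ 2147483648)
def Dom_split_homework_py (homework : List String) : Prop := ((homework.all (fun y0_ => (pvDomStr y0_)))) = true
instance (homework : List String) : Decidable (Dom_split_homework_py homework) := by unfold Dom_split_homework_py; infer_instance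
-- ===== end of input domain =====

-- B replaces A's chunk-then-pop/insert rebalance by computing the chunk-size layout up front
-- from divmod(len, 3) and slicing once per size (objective: simpler; return value only, A
-- mutates its intermediate chunk lists but never its argument).

-- ===== PORT A =====
-- A's in-place rebalance block (`list_hw[-1].insert(0, list_hw[-2].pop(2))` guarded by the
-- `len > 1 and len(last) == 1` test), as a helper on the chunk list; the `none` branch of
-- `pop?` only makes the port total (Python's pop(2) cannot raise there).
def pvPatch (l : List (List String)) : List (List String) :=
  if 1 < PySem.List.len l ∧ PySem.List.len (PySem.List.pyGetD l (-1) []) = 1 then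
    match PySem.List.pop? (PySem.List.pyGetD l (-2) []) 2 with
    | none => l
    | some (v, rest) =>
      let l' := PySem.List.pySetD l (-2) rest
      PySem.List.pySetD l' (-1) (PySem.List.insert (PySem.List.pyGetD l' (-1) []) 0 v)
  else l

def split_homework_py (homework : List String) : List (List String) :=
  let n : Int := 3
  if PySem.List.len homework ≤ n then
    [homework]
  else
    pvPatch ((PySem.List.pyRange 0 (PySem.List.len homework) n).map
      (fun i => PySem.List.slice homework (some i) (some (i + n))))

-- ===== PORT B =====
def split_homework_py_alt (homework : List String) : List (List String) :=
  if PySem.List.len homework ≤ 3 then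
    [homework]
  else
    let q := PySem.Int.floordiv (PySem.List.len homework) 3
    let r := PySem.Int.mod (PySem.List.len homework) 3
    let sizes : List Int :=
      if r = 0 then List.replicate q.toNat 3
      else if r = 2 then List.replicate q.toNat 3 ++ [2]
      else List.replicate (q - 1).toNat 3 ++ [2, 2]
    (sizes.foldl
      (fun (acc : List (List String) × Int) size =>
        (acc.1 ++ [PySem.List.slice homework (some acc.2) (some (acc.2 + size))], acc.2 + size))
      ([], 0)).1

-- ===== PRECONDITION & SPEC =====
def Spec_split_homework_py (homework : List String) (out : List (List String)) : Prop := out = split_homework_py_alt homework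
instance (homework : List String) (out : List (List String)) : Decidable (Spec_split_homework_py homework out) := by unfold Spec_split_homework_py; infer_instance

-- ===== CLAIM (what is proved, stated in full; the proofs are below) =====
def Claim_equal_split_homework_py : Prop := ∀ (homework : List String), Dom_split_homework_py homework → Spec_split_homework_py homework (split_homework_py homework)

-- ===== LEMMAS AND PROOFS =====

-- Canonical recursive chunking: groups of 3 from the front.
def pvChunks (l : List String) : List (List String) :=
  if h : l = [] then [] else l.take 3 :: pvChunks (l.drop 3)
  termination_by l.length
  decreasing_by
    simp only [List.length_drop]
    have := List.length_pos_of_ne_nil h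
    omega

-- Slices of `l` cut to the given sizes, front to back.
def pvSlices (l : List String) : List Int → List (List String)
  | [] => []
  | s :: rest => l.take s.toNat :: pvSlices (l.drop s.toNat) rest

-- B's size layout as a function of the length.
def pvSizes (L : Nat) : List Int :=
  if L % 3 = 0 then List.replicate (L / 3) 3
  else if L % 3 = 2 then List.replicate (L / 3) 3 ++ [2]
  else List.replicate (L / 3 - 1) 3 ++ [2, 2]

theorem pvSizes_nonneg (L : Nat) : ∀ s ∈ pvSizes L, 0 ≤ s := by
  intro s hs
  unfold pvSizes at hs
  split_ifs at hs <;> simp at hs <;> omega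

theorem pvSizes_step (L : Nat) (h : 6 < L) : pvSizes L = 3 :: pvSizes (L - 3) := by
  unfold pvSizes
  have e1 : (L - 3) % 3 = L % 3 := by omega
  have e2 : L / 3 = (L - 3) / 3 + 1 := by omega
  rw [e1, e2]
  rcases (by omega : L % 3 = 0 ∨ L % 3 = 1 ∨ L % 3 = 2) with h0 | h1 | h2
  · simp [h0, List.replicate_succ]
  · have : (L - 3) / 3 + 1 - 1 = ((L - 3) / 3 - 1) + 1 := by omega
    simp [h1, this, List.replicate_succ]
  · simp [h2, List.replicate_succ]

theorem pv_foldB (sizes : List Int) (hw : List String) (acc : List (List String)) (off : Nat)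
    (hnn : ∀ s ∈ sizes, 0 ≤ s) :
    (sizes.foldl
      (fun (acc : List (List String) × Int) size =>
        (acc.1 ++ [PySem.List.slice hw (some acc.2) (some (acc.2 + size))], acc.2 + size))
      (acc, (off : Int))).1 = acc ++ pvSlices (hw.drop off) sizes := by
  induction sizes generalizing acc off with
  | nil => simp [pvSlices]
  | cons s rest ih =>
    have hs : 0 ≤ s := hnn s (by simp)
    have hcast : (off : Int) + s = ((off + s.toNat : Nat) : Int) := by push_cast; omega
    simp only [List.foldl_cons, hcast]
    rw [ih _ _ (fun t ht => hnn t (by simp [ht]))]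
    have hsl : PySem.List.slice hw (some (off : Int)) (some ((off + s.toNat : Nat) : Int))
        = (hw.drop off).take s.toNat := by
      rw [PySem.List.slice_natCast]
      congr 1
      omega
    rw [hsl]
    simp [pvSlices, List.drop_drop, Nat.add_comm]

theorem pv_altChar (hw : List String) (h : 3 < hw.length) :
    split_homework_py_alt hw = pvSlices hw (pvSizes hw.length) := by
  have hq : PySem.Int.floordiv (PySem.List.len hw) 3 = ((hw.length / 3 : Nat) : Int) := by
    rw [PySem.List.len_eq]
    exact_mod_cast PySem.Int.floordiv_natCast hw.length 3
  have hr : PySem.Int.mod (PySem.List.len hw) 3 = ((hw.length % 3 : Nat) : Int) := by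
    rw [PySem.List.len_eq]
    exact_mod_cast PySem.Int.mod_natCast hw.length 3
  have ht1 : ((hw.length / 3 : Nat) : Int).toNat = hw.length / 3 := by omega
  have ht2 : (((hw.length / 3 : Nat) : Int) - 1).toNat = hw.length / 3 - 1 := by omega
  have h0 : ((0 : Int)) = ((0 : Nat) : Int) := rfl
  unfold split_homework_py_alt
  rw [if_neg (by rw [PySem.List.len_eq]; push_cast; omega)]
  simp only [hq, hr, ht1, ht2]
  have hsz : (if ((hw.length % 3 : Nat) : Int) = 0 then List.replicate (hw.length / 3) (3 : Int)
      else if ((hw.length % 3 : Nat) : Int) = 2 then List.replicate (hw.length / 3) (3 : Int) ++ [2]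
      else List.replicate (hw.length / 3 - 1) (3 : Int) ++ [2, 2]) = pvSizes hw.length := by
    unfold pvSizes
    rcases (by omega : hw.length % 3 = 0 ∨ hw.length % 3 = 1 ∨ hw.length % 3 = 2) with h' | h' | h' <;>
      simp [h']
  rw [hsz]
  have := pv_foldB (pvSizes hw.length) hw [] 0 (pvSizes_nonneg hw.length)
  simpa using this

theorem pv_lemB_step (hw : List String) (h : 6 < hw.length) :
    split_homework_py_alt hw = hw.take 3 :: split_homework_py_alt (hw.drop 3) := by
  rw [pv_altChar hw (by omega), pv_altChar (hw.drop 3) (by simp; omega),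
    pvSizes_step hw.length h]
  simp [pvSlices]

theorem pv_slice3 (l : List String) (a : Int) (ha : 0 ≤ a) :
    PySem.List.slice l (some a) (some (a + 3)) = (l.drop a.toNat).take 3 := by
  rw [PySem.List.slice_toNat l ha (by omega)]
  congr 1
  omega

theorem pv_shift (hw : List String) (m : Nat) :
    List.map (fun i => PySem.List.slice hw (some i) (some (i + 3)))
      (List.map (fun k : Nat => (0 : Int) + 3 * (k : Int)) (List.map Nat.succ (List.range m)))
    = List.map (fun i => PySem.List.slice (hw.drop 3) (some i) (some (i + 3)))
      (List.map (fun k : Nat => (0 : Int) + 3 * (k : Int)) (List.range m)) := by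
  rw [List.map_map, List.map_map, List.map_map]
  refine List.map_congr_left fun k hk => ?_
  have e1 := pv_slice3 hw (3 * ((k : Int) + 1)) (by positivity)
  have e2 := pv_slice3 (hw.drop 3) (3 * (k : Int)) (by positivity)
  simp only [Function.comp_apply, Nat.succ_eq_add_one, Nat.cast_add, Nat.cast_one,
    zero_add, e1, e2, List.drop_drop]
  congr 2
  omega

theorem pv_chunk_map (hw : List String) :
    (PySem.List.pyRange 0 (PySem.List.len hw) 3).map
      (fun i => PySem.List.slice hw (some i) (some (i + 3))) = pvChunks hw := by
  suffices H : ∀ (n : Nat) (hw : List String), hw.length ≤ n →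
      (PySem.List.pyRange 0 (PySem.List.len hw) 3).map
        (fun i => PySem.List.slice hw (some i) (some (i + 3))) = pvChunks hw by
    exact H hw.length hw le_rfl
  intro n
  induction n with
  | zero =>
    intro hw h
    have : hw = [] := by cases hw <;> simp_all
    subst this
    simp [PySem.List.pyRange, pvChunks]
  | succ n ih =>
    intro hw h
    by_cases hnil : hw = []
    · subst hnil
      simp [PySem.List.pyRange, pvChunks]
    · have hL : 0 < hw.length := List.length_pos_of_ne_nil hnil
      rw [PySem.List.len_eq, PySem.List.pyRange_of_pos _ _ (by norm_num),
        if_pos (by exact_mod_cast hL)]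
      by_cases h3 : hw.length ≤ 3
      · have hcnt : ((((hw.length : Int)) - 0 + 3 - 1) / 3).toNat = 1 := by omega
        rw [hcnt]
        rw [pvChunks, dif_neg hnil, pvChunks, dif_pos (by simp; omega)]
        simp [PySem.List.slice_to]
      · have hcnt : ((((hw.length : Int)) - 0 + 3 - 1) / 3).toNat = ((hw.length - 1) / 3) + 1 := by
          omega
        have htl := ih (hw.drop 3) (by simp; omega)
        rw [PySem.List.len_eq, PySem.List.pyRange_of_pos _ _ (by norm_num),
          if_pos (by simp; omega)] at htl
        have hcnt' : (((((hw.drop 3).length : Int)) - 0 + 3 - 1) / 3).toNat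
            = (hw.length - 1) / 3 := by simp; omega
        rw [hcnt'] at htl
        rw [hcnt, List.range_succ_eq_map]
        simp only [List.map_cons]
        rw [pv_shift hw ((hw.length - 1) / 3), htl]
        conv_rhs => rw [pvChunks]
        rw [dif_neg hnil]
        congr 1
        simp [PySem.List.slice_to]

theorem pvChunks_ne_nil (l : List String) (h : l ≠ []) : pvChunks l ≠ [] := by
  unfold pvChunks; simp [h]

theorem pv_two_concat {α : Type} (l : List α) (h : 2 ≤ l.length) :
    ∃ X y z, l = X ++ [y, z] := by
  rcases l.eq_nil_or_concat with rfl | ⟨l', a, rfl⟩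
  · simp at h
  · rcases l'.eq_nil_or_concat with rfl | ⟨X, y, rfl⟩
    · simp at h
    · exact ⟨X, y, a, by simp⟩

theorem pv_pySetD_neg {α : Type} (xs : List α) (k : Nat) (v : α) (h0 : 0 < k)
    (h : k ≤ xs.length) : PySem.List.pySetD xs (-(k : Int)) v = xs.set (xs.length - k) v := by
  unfold PySem.List.pySetD PySem.List.pySet? PySem.List.pyIdx?
  rw [if_neg (by omega), if_pos (by omega)]
  simp

theorem pv_set_append {α : Type} (X ys : List α) (v : α) :
    (X ++ ys).set X.length v = X ++ ys.set 0 v := by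
  induction X with
  | nil => simp
  | cons a X ih => simp [List.set, ih]

theorem pv_getD2 {α : Type} (X : List α) (y z d : α) :
    PySem.List.pyGetD (X ++ [y, z]) (-2) d = y := by
  rw [PySem.List.pyGetD_neg_ofNat (X ++ [y, z]) 2 d (by norm_num) (by simp)]
  have hl : (X ++ [y, z]).length - 2 = X.length := by simp
  simp [hl, List.getElem_append_right]

theorem pv_getD1 {α : Type} (X : List α) (y z d : α) :
    PySem.List.pyGetD (X ++ [y, z]) (-1) d = z := by
  rw [show X ++ [y, z] = (X ++ [y]) ++ [z] by simp]
  exact PySem.List.pyGetD_neg_one_append_singleton (X ++ [y]) z d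

theorem pv_setD2 {α : Type} (X : List α) (y z v : α) :
    PySem.List.pySetD (X ++ [y, z]) (-2) v = X ++ [v, z] := by
  rw [show ((-2 : Int)) = -((2 : Nat) : Int) by norm_num,
    pv_pySetD_neg (X ++ [y, z]) 2 v (by norm_num) (by simp)]
  have hl : (X ++ [y, z]).length - 2 = X.length := by simp
  rw [hl, pv_set_append]
  rfl

theorem pv_setD1 {α : Type} (X : List α) (y z v : α) :
    PySem.List.pySetD (X ++ [y, z]) (-1) v = X ++ [y, v] := by
  rw [show X ++ [y, z] = (X ++ [y]) ++ [z] by simp,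
    show ((-1 : Int)) = -((1 : Nat) : Int) by norm_num,
    pv_pySetD_neg ((X ++ [y]) ++ [z]) 1 v (by norm_num) (by simp)]
  have hl : ((X ++ [y]) ++ [z]).length - 1 = (X ++ [y]).length := by simp
  rw [hl, pv_set_append]
  simp

theorem pv_patch_cons (c : List String) (l : List (List String)) (h : 2 ≤ l.length) :
    pvPatch (c :: l) = c :: pvPatch l := by
  obtain ⟨X, y, z, rfl⟩ := pv_two_concat l h
  rw [show c :: (X ++ [y, z]) = (c :: X) ++ [y, z] from rfl]
  unfold pvPatch
  rw [pv_getD1, pv_getD1, pv_getD2, pv_getD2]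
  by_cases hc : PySem.List.len z = 1
  · rw [if_pos (by simp [PySem.List.len_eq] at hc ⊢; omega), if_pos (by simp [PySem.List.len_eq] at hc ⊢; omega)]
    cases hp : PySem.List.pop? y 2 with
    | none => rfl
    | some vr =>
      obtain ⟨v, rest⟩ := vr
      simp only [pv_setD2, pv_getD1, pv_setD1]
      rfl
  · rw [if_neg (by simp [PySem.List.len_eq] at hc ⊢; omega), if_neg (by simp [PySem.List.len_eq] at hc ⊢; omega)]
    rfl

theorem pv_A_char (hw : List String) (h : 3 < hw.length) :
    split_homework_py hw = pvPatch (pvChunks hw) := by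
  unfold split_homework_py
  rw [if_neg (by rw [PySem.List.len_eq]; push_cast; omega), pv_chunk_map]

theorem pv_lemA_step (hw : List String) (h : 6 < hw.length) :
    split_homework_py hw = hw.take 3 :: split_homework_py (hw.drop 3) := by
  rw [pv_A_char hw (by omega), pv_A_char (hw.drop 3) (by simp; omega)]
  have e0 : pvChunks hw = hw.take 3 :: pvChunks (hw.drop 3) := by
    rw [pvChunks, dif_neg (show ¬hw = [] by intro h'; simp [h'] at h)]
  have hlen2 : 2 ≤ (pvChunks (hw.drop 3)).length := by
    have e1 : pvChunks (hw.drop 3) = (hw.drop 3).take 3 :: pvChunks ((hw.drop 3).drop 3) := by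
      rw [pvChunks, dif_neg (by simp [List.drop_eq_nil_iff]; omega)]
    have hne : pvChunks ((hw.drop 3).drop 3) ≠ [] :=
      pvChunks_ne_nil _ (by simp [List.drop_eq_nil_iff]; omega)
    have := List.length_pos_of_ne_nil hne
    rw [e1]
    simp only [List.length_cons]
    omega
  rw [e0, pv_patch_cons _ _ hlen2]

theorem pv_small (hw : List String) (h3 : 3 < hw.length) (h6 : hw.length ≤ 6) :
    split_homework_py hw = split_homework_py_alt hw := by
  rw [pv_A_char hw h3, pv_altChar hw h3]
  obtain ⟨a, b, c, d, rest, rfl⟩ : ∃ a b c d rest, hw = a :: b :: c :: d :: rest := by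
    rcases hw with _ | ⟨a, _ | ⟨b, _ | ⟨c, _ | ⟨d, rest⟩⟩⟩⟩
    · simp at h3
    · simp at h3
    · simp at h3
    · simp at h3
    · exact ⟨a, b, c, d, rest, rfl⟩
  rcases rest with _ | ⟨e, _ | ⟨f, _ | ⟨g, t⟩⟩⟩
  · simp [pvChunks, pvPatch, pvSlices, pvSizes, PySem.List.len, PySem.List.pyGetD,
      PySem.List.pyGet?, PySem.List.pyIdx?, PySem.List.pop?, PySem.List.pySetD,
      PySem.List.pySet?, PySem.List.insert, PySem.List.sliceIndices]
  · simp [pvChunks, pvPatch, pvSlices, pvSizes, PySem.List.len, PySem.List.pyGetD,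
      PySem.List.pyGet?, PySem.List.pyIdx?, PySem.List.pop?, PySem.List.pySetD,
      PySem.List.pySet?, PySem.List.insert, PySem.List.sliceIndices]
  · simp [pvChunks, pvPatch, pvSlices, pvSizes, PySem.List.len, PySem.List.pyGetD,
      PySem.List.pyGet?, PySem.List.pyIdx?, PySem.List.pop?, PySem.List.pySetD,
      PySem.List.pySet?, PySem.List.insert, PySem.List.sliceIndices]
  · simp only [List.length_cons] at h6
    omega

theorem pv_tiny (hw : List String) (h : hw.length ≤ 3) :
    split_homework_py hw = split_homework_py_alt hw := by
  simp [split_homework_py, split_homework_py_alt, h]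

theorem pv_main : ∀ (hw : List String), split_homework_py hw = split_homework_py_alt hw := by
  have H : ∀ (n : Nat) (hw : List String), hw.length ≤ n →
      split_homework_py hw = split_homework_py_alt hw := by
    intro n
    induction n with
    | zero => intro hw h; exact pv_tiny hw (by omega)
    | succ n ih =>
      intro hw h
      by_cases h3 : hw.length ≤ 3
      · exact pv_tiny hw h3
      · by_cases h6 : hw.length ≤ 6
        · exact pv_small hw (by omega) h6
        · rw [pv_lemA_step hw (by omega), pv_lemB_step hw (by omega),
            ih (hw.drop 3) (by simp; omega)]
  intro hw
  exact H hw.length hw le_rfl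

-- ===== VERDICT (by name: the statement is the Claim_ definition above) =====
theorem split_homework_py_spec : Claim_equal_split_homework_py := by
  intro hw _
  unfold Spec_split_homework_py
  exact pv_main hw
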